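-- pv_equiv track=rewrite | github.com/yyassif/codinginterviewquestions | algorithms/1176. Diet Plan Performance.py | dietPlanPerformance
-- ===== SOURCE A (Python) =====
-- from typing import List
--
-- def dietPlanPerformance(calories: List[int], k: int, lower: int, upper: int) -> int:
--     n = len(calories)
--     score=0
--     for i in range(n-k+1):
--         sumv = 0
--         sumv = sum(calories[i:i+k])
--         if sumv<lower:
--             score-=1
--         elif sumv>upper:
--             score+=1
--     return score
-- ===== SOURCE B (Python) =====
-- def dietPlanPerformance(calories, k, lower, upper):
--     n = len(calories)
--     if k > n:
--         return 0
--     s = sum(calories[:k])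
--     score = -1 if s < lower else (1 if s > upper else 0)
--     for i in range(k, n):
--         s += calories[i] - calories[i - k]
--         score += -1 if s < lower else (1 if s > upper else 0)
--     return score
-- ===== Notes on version B (the rewrite author's own statement) =====
-- stated objective: faster
-- what changed: Replaces the per-window slice-and-sum (recomputing each k-sum from scratch) with a single sliding-window pass keeping a running sum updated by adding the entering element and subtracting the leaving one.
-- outside the precondition, e.g. on dietPlanPerformance([1, 2, 3], -1, 0, 0): A returns 1, B raises IndexError
import Mathlib
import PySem

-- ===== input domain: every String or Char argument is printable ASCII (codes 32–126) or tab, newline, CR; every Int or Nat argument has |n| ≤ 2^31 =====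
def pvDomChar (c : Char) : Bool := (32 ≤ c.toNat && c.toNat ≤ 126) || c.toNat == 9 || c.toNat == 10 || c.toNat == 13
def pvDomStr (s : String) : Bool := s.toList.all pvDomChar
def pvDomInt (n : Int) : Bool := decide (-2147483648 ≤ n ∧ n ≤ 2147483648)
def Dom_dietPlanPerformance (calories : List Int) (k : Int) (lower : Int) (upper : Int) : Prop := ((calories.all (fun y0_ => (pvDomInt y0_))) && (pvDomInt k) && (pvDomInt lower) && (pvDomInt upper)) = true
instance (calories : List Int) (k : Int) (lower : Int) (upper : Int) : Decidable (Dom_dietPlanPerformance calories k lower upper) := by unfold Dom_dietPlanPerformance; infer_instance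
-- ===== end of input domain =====

-- B replaces A's per-window slice-and-sum with one sliding-window pass keeping a running sum (faster).


-- ===== PORT A =====
def dietPlanPerformance (calories : List Int) (k : Int) (lower : Int) (upper : Int) : Int :=
  let n : Int := calories.length
  (PySem.List.pyRange 0 (n - k + 1) 1).foldl (fun score i =>
    let sumv : Int := (PySem.List.slice calories (some i) (some (i + k))).sum
    if sumv < lower then score - 1
    else if sumv > upper then score + 1
    else score) 0

-- ===== PORT B =====
def dietPlanPerformance_alt (calories : List Int) (k : Int) (lower : Int) (upper : Int) : Int :=
  let n : Int := calories.length
  if k > n then 0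
  else
    let s0 : Int := (PySem.List.slice calories none (some k)).sum
    let score0 : Int := if s0 < lower then -1 else if s0 > upper then 1 else 0
    let p := (PySem.List.pyRange k n 1).foldl (fun (st : Int × Int) i =>
      let s := st.1 + PySem.List.pyGetD calories i 0 - PySem.List.pyGetD calories (i - k) 0
      (s, st.2 + (if s < lower then -1 else if s > upper then 1 else 0))) (s0, score0)
    p.2

-- ===== PRECONDITION & SPEC =====
-- Pre_ excludes k < 0 (the problem's domain is k ≥ 1): there A scores windows produced by
-- Python's negative-slice wraparound, while the natural sliding window in B indexes out of range and raises.
def Pre_dietPlanPerformance (calories : List Int) (k : Int) (lower : Int) (upper : Int) : Prop := 0 ≤ k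
instance (calories : List Int) (k : Int) (lower : Int) (upper : Int) : Decidable (Pre_dietPlanPerformance calories k lower upper) := by unfold Pre_dietPlanPerformance; infer_instance

def pvWitness_dietPlanPerformance : List Int × Int × Int × Int := ([1, 2, 3, 4, 5], 2, 3, 7)

def Spec_dietPlanPerformance (calories : List Int) (k : Int) (lower : Int) (upper : Int) (out : Int) : Prop := out = dietPlanPerformance_alt calories k lower upper
instance (calories : List Int) (k : Int) (lower : Int) (upper : Int) (out : Int) : Decidable (Spec_dietPlanPerformance calories k lower upper out) := by unfold Spec_dietPlanPerformance; infer_instance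

-- ===== CLAIM (what is proved, stated in full; the proofs are below) =====
def Claim_equal_dietPlanPerformance : Prop := ∀ (calories : List Int) (k : Int) (lower : Int) (upper : Int), Dom_dietPlanPerformance calories k lower upper → Pre_dietPlanPerformance calories k lower upper → Spec_dietPlanPerformance calories k lower upper (dietPlanPerformance calories k lower upper)

-- ===== LEMMAS AND PROOFS =====

-- score contribution of one window sum
def pvStep (lower upper s : Int) : Int := if s < lower then -1 else if s > upper then 1 else 0

-- sum of the window of length kn starting at m
def pvWin (xs : List Int) (kn m : Nat) : Int := ((xs.drop m).take kn).sum

lemma pvWin_eq_sum (xs : List Int) (kn m : Nat) (h : m + kn ≤ xs.length) :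
    pvWin xs kn m = ∑ j ∈ Finset.range kn, xs.getD (m + j) 0 := by
  induction kn generalizing m with
  | zero => simp [pvWin]
  | succ kn ih =>
    have hm : m < xs.length := by omega
    have hdrop : xs.drop m = xs[m] :: xs.drop (m + 1) := List.drop_eq_getElem_cons hm
    rw [Finset.sum_range_succ']
    simp only [add_zero]
    have heq : ∑ j ∈ Finset.range kn, xs.getD (m + (j + 1)) 0
        = ∑ j ∈ Finset.range kn, xs.getD (m + 1 + j) 0 :=
      Finset.sum_congr rfl (fun j _ => by congr 1; omega)
    rw [heq, ← ih (m + 1) (by omega)]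
    simp only [pvWin]
    rw [hdrop, List.take_succ_cons, List.sum_cons, List.getD_eq_getElem xs 0 hm]
    ring

lemma pvWin_succ (xs : List Int) (kn m : Nat) (h : m + kn < xs.length) :
    pvWin xs kn (m + 1) = pvWin xs kn m + xs.getD (m + kn) 0 - xs.getD m 0 := by
  rw [pvWin_eq_sum xs kn (m + 1) (by omega), pvWin_eq_sum xs kn m (by omega)]
  have h1 : ∑ j ∈ Finset.range (kn + 1), xs.getD (m + j) 0
      = xs.getD m 0 + ∑ j ∈ Finset.range kn, xs.getD (m + 1 + j) 0 := by
    rw [Finset.sum_range_succ']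
    simp only [add_zero]
    rw [add_comm]
    congr 1
    exact Finset.sum_congr rfl (fun j _ => by congr 1; omega)
  have h2 : ∑ j ∈ Finset.range (kn + 1), xs.getD (m + j) 0
      = (∑ j ∈ Finset.range kn, xs.getD (m + j) 0) + xs.getD (m + kn) 0 :=
    Finset.sum_range_succ _ _
  omega

-- A's fold over window starts computes the sum of steps
lemma pvAfold (xs : List Int) (lower upper : Int) (kn : Nat) (M : Nat) (c : Int) :
    List.foldl (fun score (j : Nat) =>
        if ((xs.drop j).take kn).sum < lower then score - 1
        else if ((xs.drop j).take kn).sum > upper then score + 1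
        else score) c (List.range M)
      = c + ∑ j ∈ Finset.range M, pvStep lower upper (pvWin xs kn j) := by
  induction M generalizing c with
  | zero => simp
  | succ M ih =>
    rw [List.range_succ, List.foldl_append, ih, Finset.sum_range_succ]
    simp only [List.foldl_cons, List.foldl_nil, pvStep, pvWin]
    split_ifs <;> ring

-- B's fold invariant: running sum is the current window sum, score accumulates steps
lemma pvBfold (xs : List Int) (lower upper : Int) (kn : Nat)
    (hkn : kn ≤ xs.length) (M : Nat) (hM : M ≤ xs.length - kn) (c : Int) :
    List.foldl (fun (st : Int × Int) (j : Nat) =>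
        (st.1 + xs.getD (kn + j) 0 - xs.getD j 0,
          st.2 + (if st.1 + xs.getD (kn + j) 0 - xs.getD j 0 < lower then -1
            else if st.1 + xs.getD (kn + j) 0 - xs.getD j 0 > upper then 1 else 0)))
      ((xs.take kn).sum, c) (List.range M)
      = (pvWin xs kn M, c + ∑ j ∈ Finset.range M, pvStep lower upper (pvWin xs kn (j + 1))) := by
  induction M generalizing c with
  | zero => simp [pvWin]
  | succ M ih =>
    rw [List.range_succ, List.foldl_append, ih (by omega)]
    have hw : pvWin xs kn M + xs.getD (kn + M) 0 - xs.getD M 0 = pvWin xs kn (M + 1) := by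
      rw [pvWin_succ xs kn M (by omega), Nat.add_comm kn M]
    simp only [List.foldl_cons, List.foldl_nil]
    rw [hw, Finset.sum_range_succ]
    exact Prod.ext rfl (by simp only [pvStep]; ring)

-- ===== VERDICT (by name: the statement is the Claim_ definition above) =====
theorem dietPlanPerformance_spec : Claim_equal_dietPlanPerformance := by
  intro calories k lower upper _ hk
  unfold Pre_dietPlanPerformance at hk
  unfold Spec_dietPlanPerformance dietPlanPerformance dietPlanPerformance_alt
  simp only []
  set n : Int := (calories.length : Int) with hn
  by_cases hgt : k > n
  · -- no window: A's range is empty, B returns 0 directly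
    have : n - k + 1 ≤ 0 := by omega
    rw [PySem.List.pyRange_one_eq_nil this]
    simp [hgt]
  · push_neg at hgt
    obtain ⟨kn, rfl⟩ : ∃ kn : Nat, k = (kn : Int) := ⟨k.toNat, by omega⟩
    have hkn : kn ≤ calories.length := by rw [hn] at hgt; exact_mod_cast hgt
    rw [if_neg (by omega : ¬ ((kn : Int) > n))]
    -- A side: turn the fold over pyRange into a fold over List.range of window sums
    have hcastA : ((n - (kn : Int) + 1 - 0)).toNat = calories.length - kn + 1 := by omega
    rw [PySem.List.pyRange_one, List.foldl_map, hcastA]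
    simp only [zero_add, PySem.List.slice_natCast_add]
    rw [pvAfold]
    -- B side
    rw [PySem.List.slice_to_natCast]
    have hcastB : ((n - (kn : Int))).toNat = calories.length - kn := by omega
    rw [PySem.List.pyRange_one, List.foldl_map, hcastB]
    simp only [add_sub_cancel_left]
    simp only [← Nat.cast_add]
    simp only [PySem.List.pyGetD_natCast]
    rw [pvBfold calories lower upper kn hkn (calories.length - kn) (le_refl _)]
    -- both sides are sums of steps over all windows
    rw [Finset.sum_range_succ' (fun j => pvStep lower upper (pvWin calories kn j))]
    have h0 : pvWin calories kn 0 = (calories.take kn).sum := by simp [pvWin]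
    simp only [pvStep, h0]
    ring
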